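-- pv_equiv track=rewrite | github.com/sugan0tech/Projects | programming/python/accenture/cyclone.py | sensor2
-- ===== SOURCE A (Python) =====
-- def sensor2(n:int, x:int) -> list:
--     temp = x
--     lst = []
--     for i in range(n):
--         if True:
--             for i in range(x):
--                 if len(lst) < n:
--                     lst.append(temp)
--         temp += x
--     lst.sort()
--     return lst
-- ===== SOURCE B (Python) =====
-- def sensor2(n: int, x: int) -> list:
--     # closed form: element i (0-based) is (i//x + 1)*x; empty when x <= 0
--     if x <= 0:
--         return []
--     return [(i // x + 1) * x for i in range(n)]
-- ===== Notes on version B (the rewrite author's own statement) =====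
-- stated objective: faster
-- what changed: A builds the list with an O(n*x) nested append loop guarded by a length check and then sorts it; B emits each element directly by the closed form (i//x+1)*x for i in range(n) (empty when x<=0), no inner loop and no sort.
import Mathlib
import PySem

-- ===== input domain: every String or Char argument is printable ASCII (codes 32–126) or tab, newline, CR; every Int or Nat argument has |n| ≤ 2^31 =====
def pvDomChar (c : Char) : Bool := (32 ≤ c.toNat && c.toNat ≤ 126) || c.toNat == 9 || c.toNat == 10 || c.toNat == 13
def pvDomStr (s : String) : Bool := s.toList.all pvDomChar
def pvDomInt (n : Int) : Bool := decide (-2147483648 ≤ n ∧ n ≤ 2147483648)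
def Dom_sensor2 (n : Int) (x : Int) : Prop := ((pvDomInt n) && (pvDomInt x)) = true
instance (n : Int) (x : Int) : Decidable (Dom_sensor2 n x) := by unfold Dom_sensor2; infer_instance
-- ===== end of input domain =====

-- B replaces A's nested append-and-sort loop by the closed form
-- [(i // x + 1) * x for i in range(n)] (empty when x <= 0): same value, single pass, no sort.

-- ===== PORT A =====
def sensor2 (n : Int) (x : Int) : List Int :=
  let st := (PySem.List.pyRange 0 n 1).foldl
    (fun (st : Int × List Int) _ =>
      let lst := (PySem.List.pyRange 0 x 1).foldl
        (fun (lst : List Int) _ => if (lst.length : Int) < n then lst ++ [st.1] else lst) st.2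
      (st.1 + x, lst))
    (x, ([] : List Int))
  PySem.List.sorted st.2 (fun v => v) false

-- ===== PORT B =====
def sensor2_alt (n : Int) (x : Int) : List Int :=
  if x ≤ 0 then []
  else (PySem.List.pyRange 0 n 1).map (fun i => (PySem.Int.floordiv i x + 1) * x)

-- ===== PRECONDITION & SPEC =====
def Spec_sensor2 (n : Int) (x : Int) (out : List Int) : Prop := out = sensor2_alt n x
instance (n : Int) (x : Int) (out : List Int) : Decidable (Spec_sensor2 n x out) := by unfold Spec_sensor2; infer_instance

-- ===== CLAIM (what is proved, stated in full; the proofs are below) =====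
def Claim_equal_sensor2 : Prop := ∀ (n : Int) (x : Int), Dom_sensor2 n x → Spec_sensor2 n x (sensor2 n x)

-- ===== LEMMAS AND PROOFS =====

-- Inner loop of A: over m iterations it appends min m (n.toNat - lst.length) copies of t.
lemma inner_fold_eq (n t : Int) (m : Nat) (lst : List Int) :
    (List.range m).foldl
      (fun (l : List Int) (_ : Nat) => if (l.length : Int) < n then l ++ [t] else l) lst
    = lst ++ List.replicate (min m (n.toNat - lst.length)) t := by
  induction m with
  | zero => simp
  | succ m ih =>
    rw [List.range_succ, List.foldl_append, ih]
    simp only [List.foldl_cons, List.foldl_nil]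
    by_cases h : ((lst ++ List.replicate (min m (n.toNat - lst.length)) t).length : Int) < n
    · rw [if_pos h]
      have hlen : lst.length + min m (n.toNat - lst.length) < n.toNat := by
        simp [List.length_append] at h; omega
      have hmin : min (m + 1) (n.toNat - lst.length) = min m (n.toNat - lst.length) + 1 := by omega
      rw [hmin, List.replicate_succ', ← List.append_assoc]
    · rw [if_neg h]
      have hlen : ¬ lst.length + min m (n.toNat - lst.length) < n.toNat := by
        simp [List.length_append] at h; omega
      have hmin : min (m + 1) (n.toNat - lst.length) = min m (n.toNat - lst.length) := by omega
      rw [hmin]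

-- the per-index value B emits, Nat-side
def pvVal (X j : Nat) : Int := ((j / X : Nat) : Int) + 1

-- one outer step of A extends the emitted prefix by the next block of copies
lemma segment_step (N X i : Nat) (x : Int) :
    List.map (fun j => pvVal X j * x) (List.range (min ((i + 1) * X) N))
    = List.map (fun j => pvVal X j * x) (List.range (min (i * X) N))
      ++ List.replicate (min X (N - min (i * X) N)) (((i : Int) + 1) * x) := by
  have hmul : (i + 1) * X = i * X + X := by ring
  have hab : min (i * X) N ≤ min ((i + 1) * X) N := by omega
  have hcnt : min X (N - min (i * X) N) = min ((i + 1) * X) N - min (i * X) N := by omega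
  rw [hcnt]
  have hsplit : min ((i + 1) * X) N
      = min (i * X) N + (min ((i + 1) * X) N - min (i * X) N) := by omega
  rw [hsplit, List.range_add, List.map_append, List.map_map]
  congr 1
  rw [List.eq_replicate_iff]
  refine ⟨by simp, ?_⟩
  intro b hb
  simp only [List.mem_map, List.mem_range] at hb
  obtain ⟨k, hk, rfl⟩ := hb
  have ha : min (i * X) N = i * X := by omega
  have hdiv : (min (i * X) N + k) / X = i := by
    apply Nat.div_eq_of_lt_le <;> omega
  simp only [Function.comp_apply, pvVal, hdiv]

-- outer loop invariant of A (for 0 < x, with X := x.toNat)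
lemma outer_fold_eq (n x : Int) (m : Nat) :
    (List.range m).foldl
      (fun (st : Int × List Int) (_ : Nat) =>
        (st.1 + x,
         (List.range x.toNat).foldl
           (fun (l : List Int) (_ : Nat) => if (l.length : Int) < n then l ++ [st.1] else l) st.2))
      (x, ([] : List Int))
    = (((m : Int) + 1) * x,
       List.map (fun j => pvVal x.toNat j * x) (List.range (min (m * x.toNat) n.toNat))) := by
  induction m with
  | zero => simp
  | succ m ih =>
    rw [List.range_succ, List.foldl_append, ih]
    simp only [List.foldl_cons, List.foldl_nil, Prod.mk.injEq]
    constructor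
    · push_cast; ring
    · rw [inner_fold_eq, segment_step n.toNat x.toNat m x]
      congr 2
      simp

-- B's per-index values are nondecreasing, so A's final sort is the identity
lemma pairwise_pvVal (N X : Nat) (x : Int) (hx : 0 ≤ x) :
    (List.map (fun j => pvVal X j * x) (List.range N)).Pairwise (fun a b => a ≤ b) := by
  rw [List.pairwise_map]
  refine List.pairwise_lt_range.imp ?_
  intro j k hjk
  apply mul_le_mul_of_nonneg_right _ hx
  simp only [pvVal]
  have := Nat.div_le_div_right (c := X) hjk.le
  omega

theorem sensor2_spec : Claim_equal_sensor2 := by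
  intro n x _
  unfold Spec_sensor2 sensor2 sensor2_alt
  by_cases hx : x ≤ 0
  · rw [if_pos hx]
    have hr : PySem.List.pyRange 0 x 1 = [] := PySem.List.pyRange_one_eq_nil hx
    simp only [hr, List.foldl_nil]
    have hsnd : ∀ (L : List Int) (st : Int × List Int),
        (L.foldl (fun (st : Int × List Int) _ => (st.1 + x, st.2)) st).2 = st.2 := by
      intro L
      induction L with
      | nil => intro st; rfl
      | cons a L ih => intro st; simpa using ih _
    rw [hsnd]
    simp [PySem.List.sorted]
  · rw [if_neg hx]
    rw [Int.not_le] at hx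
    simp only [PySem.List.pyRange_zero, List.foldl_map, List.map_map]
    rw [outer_fold_eq n x n.toNat]
    have hX : 0 < x.toNat := by omega
    have hmin : min (n.toNat * x.toNat) n.toNat = n.toNat :=
      min_eq_right (Nat.le_mul_of_pos_right _ hX)
    rw [hmin, PySem.List.sorted_eq_self_of_pairwise _ _ (pairwise_pvVal n.toNat x.toNat x hx.le)]
    apply List.map_congr_left
    intro j _
    have hxc : ((x.toNat : Nat) : Int) = x := Int.toNat_of_nonneg hx.le
    simp only [Function.comp_apply, pvVal]
    rw [← hxc, PySem.Int.floordiv_natCast]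
    simp
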